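-- pv_equiv track=rewrite | github.com/mazadegan/snc2fst | src/snc2fst/nc.py | shared_valued_features
-- ===== SOURCE A (Python) =====
-- def shared_valued_features(
--     alphabet: dict[str, dict[str, str]],
--     segments: list[str],
-- ) -> list[tuple[str, str]]:
--     if not segments:
--         return []
--
--     shared: list[tuple[str, str]] = []
--     feature_names = sorted({feature for bundle in alphabet.values() for feature in bundle})
--     for feature in feature_names:
--         first = alphabet[segments[0]].get(feature)
--         if first not in ("+", "-"):
--             continue
--         if all(alphabet[segment].get(feature) == first for segment in segments[1:]):
--             shared.append((first, feature))
--     return shared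
-- ===== SOURCE B (Python) =====
-- def shared_valued_features(
--     alphabet: dict[str, dict[str, str]],
--     segments: list[str],
-- ) -> list[tuple[str, str]]:
--     if not segments:
--         return []
--     # start from the first segment's binary-valued feature pairs ...
--     pairs = {(f, v) for f, v in alphabet[segments[0]].items() if v in ("+", "-")}
--     # ... and intersect with every remaining segment
--     for segment in segments[1:]:
--         bundle = alphabet[segment]
--         pairs = {(f, v) for f, v in pairs if bundle.get(f) == v}
--     return [(v, f) for f, v in sorted(pairs, key=lambda p: p[0])]
-- ===== Notes on version B (the rewrite author's own statement) =====
-- stated objective: simpler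
-- what changed: Instead of scanning every feature name occurring anywhere in the alphabet and re-checking all segments per feature, B builds the set of (feature,value) pairs with value '+'/'-' from the first segment's bundle, narrows it once per remaining segment, and finally sorts by feature name; Pre_ excludes (a) nonempty segment lists containing a segment absent from alphabet, where A raises KeyError or (by all()'s short-circuit) returns a partial result where B raises KeyError, and (b) association lists with duplicate keys, which no Python dict can produce.
-- outside the precondition, e.g. on shared_valued_features({'x': {'f': '0'}}, ['x', 'y']): A returns [], B raises KeyError
import Mathlib
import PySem

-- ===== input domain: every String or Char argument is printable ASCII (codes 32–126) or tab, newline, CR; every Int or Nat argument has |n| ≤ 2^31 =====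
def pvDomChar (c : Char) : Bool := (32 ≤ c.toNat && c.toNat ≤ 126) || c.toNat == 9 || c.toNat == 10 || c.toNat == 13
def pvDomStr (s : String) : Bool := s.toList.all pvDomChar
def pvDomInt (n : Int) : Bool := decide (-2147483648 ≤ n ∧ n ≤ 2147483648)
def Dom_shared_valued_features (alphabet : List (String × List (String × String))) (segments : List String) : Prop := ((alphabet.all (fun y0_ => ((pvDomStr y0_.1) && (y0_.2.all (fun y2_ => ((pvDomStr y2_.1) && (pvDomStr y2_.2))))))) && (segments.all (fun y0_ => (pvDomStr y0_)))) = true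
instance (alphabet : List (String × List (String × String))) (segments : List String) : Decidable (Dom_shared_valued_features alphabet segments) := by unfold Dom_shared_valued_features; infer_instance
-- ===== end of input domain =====

-- B replaces A's scan over every feature name in the whole alphabet by intersecting the
-- first segment's binary-valued (feature, value) pairs through the remaining segments (simpler).

-- ===== PORT A =====
def shared_valued_features (alphabet : List (String × List (String × String))) (segments : List String) : List (String × String) :=
  if segments = [] then []
  else
    let feature_names := PySem.List.sorted
      (PySem.Set.ofList (alphabet.flatMap (fun bundle => bundle.2.map Prod.fst))) (fun f => f)
    feature_names.foldl (fun shared feature =>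
      match (PySem.Dict.mk ((PySem.Dict.mk alphabet).getD (segments.headD "") [])).get? feature with
      | none => shared
      | some v =>
        if v = "+" ∨ v = "-" then
          if (segments.drop 1).all (fun seg =>
              (PySem.Dict.mk ((PySem.Dict.mk alphabet).getD seg [])).get? feature == some v)
          then shared ++ [(v, feature)] else shared
        else shared) []

-- ===== PORT B =====
def shared_valued_features_alt (alphabet : List (String × List (String × String))) (segments : List String) : List (String × String) :=
  if segments = [] then []
  else
    let pairs0 : PySem.Set (String × String) :=
      PySem.Set.ofList (((PySem.Dict.mk alphabet).getD (segments.headD "") []).filter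
        (fun p => p.2 == "+" || p.2 == "-"))
    let pairs := (segments.drop 1).foldl (fun pr seg =>
        let bundle := (PySem.Dict.mk alphabet).getD seg []
        PySem.Set.ofList (pr.filter (fun p => (PySem.Dict.mk bundle).get? p.1 == some p.2))) pairs0
    (PySem.List.sorted pairs Prod.fst).map (fun p => (p.2, p.1))

-- ===== PRECONDITION & SPEC =====
-- Pre_ excludes (a) nonempty segment lists containing a segment absent from alphabet, where A
-- raises KeyError or (by all()'s short-circuit) returns a partial result where B
-- raises KeyError, and (b) association lists with duplicate keys, which no Python dict can produce.
def Pre_shared_valued_features (alphabet : List (String × List (String × String))) (segments : List String) : Prop :=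
  ((alphabet.map Prod.fst).Nodup) ∧
  (∀ p ∈ alphabet, (p.2.map Prod.fst).Nodup) ∧
  (∀ s ∈ segments, s ∈ alphabet.map Prod.fst)
instance (alphabet : List (String × List (String × String))) (segments : List String) : Decidable (Pre_shared_valued_features alphabet segments) := by unfold Pre_shared_valued_features; infer_instance

def pvWitness_shared_valued_features : (List (String × List (String × String))) × List String :=
  ([("a", [("f1", "+"), ("f2", "0")]), ("b", [("f1", "+")])], ["a", "b"])

def Spec_shared_valued_features (alphabet : List (String × List (String × String))) (segments : List String) (out : List (String × String)) : Prop := out = shared_valued_features_alt alphabet segments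
instance (alphabet : List (String × List (String × String))) (segments : List String) (out : List (String × String)) : Decidable (Spec_shared_valued_features alphabet segments out) := by unfold Spec_shared_valued_features; infer_instance

-- ===== CLAIM (what is proved, stated in full; the proofs are below) =====
def Claim_equal_shared_valued_features : Prop := ∀ (alphabet : List (String × List (String × String))) (segments : List String), Dom_shared_valued_features alphabet segments → Pre_shared_valued_features alphabet segments → Spec_shared_valued_features alphabet segments (shared_valued_features alphabet segments)

-- ===== LEMMAS AND PROOFS =====

-- first-match lookup of a present key returns a pair of the list
theorem pv_getD_mk_mem (l : List (String × List (String × String))) (s : String)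
    (h : s ∈ l.map Prod.fst) : (s, (PySem.Dict.mk l).getD s []) ∈ l := by
  induction l with
  | nil => simp at h
  | cons p rest ih =>
    rcases p with ⟨k, v⟩
    by_cases hks : k = s
    · subst hks
      simp [PySem.Dict.getD_eq_get?_getD, PySem.Dict.get?_mk_cons]
    · have hs : s ∈ rest.map Prod.fst := by
        simp only [List.map_cons, List.mem_cons] at h
        rcases h with h' | h'
        · exact absurd h'.symm hks
        · exact h'
      right
      have := ih hs
      simpa [PySem.Dict.getD_eq_get?_getD, PySem.Dict.get?_mk_cons, hks] using this

-- A's loop is a filterMap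
theorem pv_foldl_filterMap {α β : Type} (h : α → Option β) (xs : List α) (acc : List β) :
    xs.foldl (fun sh x => sh ++ (h x).toList) acc = acc ++ xs.filterMap h := by
  induction xs generalizing acc with
  | nil => simp
  | cons x xs ih =>
    cases hx : h x <;> simp [List.foldl_cons, hx, ih]

-- B's intersection loop is a single filter by the conjunction
theorem pv_foldl_filter (q : String → (String × String) → Bool) (rest : List String)
    (l : List (String × String)) (hl : l.Nodup) :
    rest.foldl (fun pr seg => PySem.Set.ofList (pr.filter (q seg))) l
      = l.filter (fun p => rest.all (fun seg => q seg p)) := by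
  induction rest generalizing l with
  | nil => simp [List.filter_eq_self.mpr]
  | cons seg rest ih =>
    have hn : (l.filter (q seg)).Nodup := hl.filter _
    rw [List.foldl_cons, PySem.Set.ofList_eq_self_of_nodup _ hn, ih _ hn, List.filter_filter]
    apply List.filter_congr
    intro p _
    simp [Bool.and_comm]


-- A's per-feature decision, as an Option: some (value, feature) iff A appends it
def pvH (alphabet : List (String × List (String × String))) (rest : List String)
    (fb : List (String × String)) (feature : String) : Option (String × String) :=
  match (PySem.Dict.mk fb).get? feature with
  | none => none
  | some v =>
    if v = "+" ∨ v = "-" then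
      if rest.all (fun seg =>
          (PySem.Dict.mk ((PySem.Dict.mk alphabet).getD seg [])).get? feature == some v)
      then some (v, feature) else none
    else none

theorem pvH_swap_fst (alphabet : List (String × List (String × String))) (rest : List String)
    (fb : List (String × String)) (f : String) (p : String × String)
    (h : (pvH alphabet rest fb f).map (fun p => (p.2, p.1)) = some p) : p.1 = f := by
  unfold pvH at h
  cases hg : (PySem.Dict.mk fb).get? f
  · rw [hg] at h
    simp at h
  · rw [hg] at h
    dsimp only at h
    split_ifs at h
    · simp only [Option.map_some, Option.some.injEq] at h
      rw [← h]
    · simp at h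
    · simp at h

theorem shared_valued_features_spec' :
    ∀ (alphabet : List (String × List (String × String))) (segments : List String),
      Pre_shared_valued_features alphabet segments →
      shared_valued_features alphabet segments = shared_valued_features_alt alphabet segments := by
  intro alphabet segments hpre
  obtain ⟨hkeys, hbundles, hsegs⟩ := hpre
  cases segments with
  | nil => simp [shared_valued_features, shared_valued_features_alt]
  | cons s0 rest =>
    have hcons : (s0 :: rest : List String) ≠ [] := by simp
    set fb := (PySem.Dict.mk alphabet).getD s0 [] with hfb
    have hfbmem : (s0, fb) ∈ alphabet :=
      pv_getD_mk_mem alphabet s0 (hsegs s0 (by simp))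
    have hfbkeys : (fb.map Prod.fst).Nodup := hbundles _ hfbmem
    have hfbnd : fb.Nodup := hfbkeys.of_map
    -- A as a filterMap over the sorted feature names
    have hA : shared_valued_features alphabet (s0 :: rest)
        = (PySem.List.sorted
            (PySem.Set.ofList (alphabet.flatMap (fun bundle => bundle.2.map Prod.fst))) (fun f => f)).filterMap
            (pvH alphabet rest fb) := by
      unfold shared_valued_features
      rw [if_neg hcons]
      have hbody : (fun (shared : List (String × String)) feature =>
          match (PySem.Dict.mk ((PySem.Dict.mk alphabet).getD ((s0 :: rest).headD "") [])).get? feature with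
          | none => shared
          | some v =>
            if v = "+" ∨ v = "-" then
              if ((s0 :: rest).drop 1).all (fun seg =>
                  (PySem.Dict.mk ((PySem.Dict.mk alphabet).getD seg [])).get? feature == some v)
              then shared ++ [(v, feature)] else shared
            else shared)
          = (fun sh f => sh ++ (pvH alphabet rest fb f).toList) := by
        funext sh f
        simp only [List.headD_cons, List.drop_succ_cons, List.drop_zero, ← hfb]
        unfold pvH
        cases (PySem.Dict.mk fb).get? f
        · simp
        · dsimp only
          split_ifs <;> simp
      dsimp only
      rw [hbody]
      simpa using pv_foldl_filterMap (pvH alphabet rest fb)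
        (PySem.List.sorted
          (PySem.Set.ofList (alphabet.flatMap (fun bundle => bundle.2.map Prod.fst)))
          (fun f => f)) []
    -- B as a sorted filter of the first bundle
    have hp0 : (fb.filter (fun p => p.2 == "+" || p.2 == "-")).Nodup := hfbnd.filter _
    have hB : shared_valued_features_alt alphabet (s0 :: rest)
        = (PySem.List.sorted
            (fb.filter (fun p => (p.2 == "+" || p.2 == "-") &&
              rest.all (fun seg =>
                (PySem.Dict.mk ((PySem.Dict.mk alphabet).getD seg [])).get? p.1 == some p.2)))
            Prod.fst).map (fun p => (p.2, p.1)) := by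
      unfold shared_valued_features_alt
      rw [if_neg hcons]
      dsimp only
      simp only [List.headD_cons, List.drop_succ_cons, List.drop_zero, ← hfb]
      rw [PySem.Set.ofList_eq_self_of_nodup _ hp0,
        pv_foldl_filter (fun seg p =>
          (PySem.Dict.mk ((PySem.Dict.mk alphabet).getD seg [])).get? p.1 == some p.2) rest _ hp0,
        List.filter_filter]
      congr 2
      apply List.filter_congr
      intro p _
      simp [Bool.and_comm]
    rw [hA, hB]
    -- the target list: A's filterMap with components swapped
    set ys := (PySem.List.sorted
        (PySem.Set.ofList (alphabet.flatMap (fun bundle => bundle.2.map Prod.fst))) (fun f => f)).filterMap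
        (fun f => (pvH alphabet rest fb f).map (fun p => (p.2, p.1))) with hys
    have hyspw : ys.Pairwise (fun a b => a.1 < b.1) := by
      rw [hys]
      refine List.Pairwise.filterMap _ ?_ (PySem.List.sorted_ofList_pairwise_lt _)
      intro a a' hlt b hb b' hb'
      rw [pvH_swap_fst _ _ _ _ _ hb, pvH_swap_fst _ _ _ _ _ hb']
      exact hlt
    have hysnd : ys.Nodup :=
      hyspw.imp (fun {a b} h => by intro he; rw [he] at h; exact lt_irrefl _ h)
    have hfilnd : (fb.filter (fun p => (p.2 == "+" || p.2 == "-") &&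
        rest.all (fun seg =>
          (PySem.Dict.mk ((PySem.Dict.mk alphabet).getD seg [])).get? p.1 == some p.2))).Nodup :=
      hfbnd.filter _
    have hmem : ∀ p : String × String, p ∈ ys ↔ p ∈ fb.filter (fun p => (p.2 == "+" || p.2 == "-") &&
        rest.all (fun seg =>
          (PySem.Dict.mk ((PySem.Dict.mk alphabet).getD seg [])).get? p.1 == some p.2)) := by
      intro p
      rw [hys, List.mem_filterMap, List.mem_filter]
      constructor
      · rintro ⟨f, hf, hpf⟩
        have hfst := pvH_swap_fst _ _ _ _ _ hpf
        unfold pvH at hpf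
        cases hg : (PySem.Dict.mk fb).get? f
        · rw [hg] at hpf
          simp at hpf
        · rename_i v
          rw [hg] at hpf
          dsimp only at hpf
          split_ifs at hpf with h1 h2
          · simp only [Option.map_some, Option.some.injEq] at hpf
            subst hpf
            refine ⟨?_, ?_⟩
            · exact (PySem.Dict.get?_eq_some_iff_mem_items (PySem.Dict.mk fb) f v
                (by simpa [PySem.Dict.keys_mk] using hfbkeys)).mp hg
            · simp only [Bool.and_eq_true]
              constructor
              · rcases h1 with h1 | h1 <;> simp [h1]
              · simpa using h2
          · simp at hpf
          · simp at hpf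
      · rintro ⟨hpfb, hcond⟩
        simp only [Bool.and_eq_true, Bool.or_eq_true, beq_iff_eq] at hcond
        obtain ⟨hpm, hall⟩ := hcond
        refine ⟨p.1, ?_, ?_⟩
        · rw [PySem.List.mem_sorted, PySem.Set.mem_ofList, List.mem_flatMap]
          exact ⟨(s0, fb), hfbmem, List.mem_map_of_mem hpfb⟩
        · have hg : (PySem.Dict.mk fb).get? p.1 = some p.2 :=
            (PySem.Dict.get?_eq_some_iff_mem_items (PySem.Dict.mk fb) p.1 p.2
              (by simpa [PySem.Dict.keys_mk] using hfbkeys)).mpr hpfb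
          unfold pvH
          rw [hg]
          dsimp only
          rw [if_pos hpm, if_pos (by simpa using hall)]
          simp
    have hperm : ys.Perm (fb.filter (fun p => (p.2 == "+" || p.2 == "-") &&
        rest.all (fun seg =>
          (PySem.Dict.mk ((PySem.Dict.mk alphabet).getD seg [])).get? p.1 == some p.2))) :=
      (List.perm_ext_iff_of_nodup hysnd hfilnd).mpr hmem
    rw [PySem.List.sorted_eq_of_perm_of_pairwise_lt _ ys Prod.fst hperm hyspw]
    rw [hys, List.map_filterMap]
    apply List.filterMap_congr
    intro f _
    rw [Option.map_map]
    cases pvH alphabet rest fb f <;> simp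

-- ===== VERDICT (by name: the statement is the Claim_ definition above) =====
theorem shared_valued_features_spec : Claim_equal_shared_valued_features := by
  intro alphabet segments _ hpre
  unfold Spec_shared_valued_features
  exact shared_valued_features_spec' alphabet segments hpre
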